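-- pv_equiv track=rewrite | github.com/suchot/CS-Notes | docs/offer/爱奇艺/排列计数.py | sortcount1
-- ===== SOURCE A (Python) =====
-- from itertools import permutations
--
-- def sortcount1(n,arr):
--     se  = list(permutations([i for i in range(1,n+1)]))
--     count = 0
--     for p in se:
--         i = 0
--         while i < n-1:
--             if arr[i] == 0 and p[i]<p[i+1]:
--                 i += 1
--                 continue
--             elif arr[i] == 1 and p[i]>p[i+1]:
--                 i+=1
--                 continue
--             else:
--                 break
--         if i==n-1:
--             count += 1
--     return count
-- ===== SOURCE B (Python) =====
-- def sortcount1(n, arr):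
--     # O(n^2) DP over the rank of the last placed value instead of enumerating all n! permutations.
--     if n <= 0:
--         return 0
--     dp = [1]  # dp[j] = number of valid prefixes using values 1..i whose last value is j+1
--     for i in range(1, n):
--         c = arr[i - 1]
--         if c != 0 and c != 1:
--             return 0  # unknown constraint: no permutation can match
--         pre = [0]
--         for v in dp:
--             pre.append(pre[-1] + v)
--         if c == 0:
--             dp = [pre[j] for j in range(i + 1)]
--         else:
--             dp = [pre[i] - pre[j] for j in range(i + 1)]
--     return sum(dp)
-- ===== Notes on version B (the rewrite author's own statement) =====
-- stated objective: faster
-- what changed: Replaced brute-force enumeration of all n! permutations (testing each against the pattern) by an O(n^2) dynamic program over the rank of the last placed value, using prefix sums of the previous row; B returns 0 immediately on a constraint value outside {0,1}.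
import Mathlib
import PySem

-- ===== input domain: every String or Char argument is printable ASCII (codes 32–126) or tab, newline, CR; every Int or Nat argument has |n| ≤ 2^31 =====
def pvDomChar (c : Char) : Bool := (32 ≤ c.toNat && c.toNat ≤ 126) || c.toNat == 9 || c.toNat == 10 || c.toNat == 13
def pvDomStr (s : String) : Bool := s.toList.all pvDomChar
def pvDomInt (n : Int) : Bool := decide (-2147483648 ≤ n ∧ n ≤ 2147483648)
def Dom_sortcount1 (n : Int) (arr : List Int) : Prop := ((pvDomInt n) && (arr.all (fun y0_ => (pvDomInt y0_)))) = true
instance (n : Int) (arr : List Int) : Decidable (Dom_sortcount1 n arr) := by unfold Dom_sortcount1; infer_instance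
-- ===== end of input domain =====

-- B replaces A's O(n!·n) filter over all permutations by an O(n^2) DP on the rank of the last value.

-- ===== PORT A =====
-- A's while loop: advances i while the constraint at i holds, returns the final i
def pvAWhile (arr p : List Int) (nm1 : Int) : Nat → Int → Int
  | 0, i => i
  | fuel+1, i =>
    if i < nm1 then
      let a := (PySem.List.pyGet? arr i).getD 0
      let x := (PySem.List.pyGet? p i).getD 0
      let y := (PySem.List.pyGet? p (i+1)).getD 0
      if a = 0 ∧ x < y then pvAWhile arr p nm1 fuel (i+1)
      else if a = 1 ∧ x > y then pvAWhile arr p nm1 fuel (i+1)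
      else i
    else i

def sortcount1 (n : Int) (arr : List Int) : Int :=
  let se := (PySem.List.pyRange 1 (n+1) 1).permutations
  se.foldl (fun count p => if pvAWhile arr p (n-1) (n-1).toNat 0 = n-1 then count + 1 else count) 0

-- ===== PORT B =====
-- pre = running prefix sums of dp starting at 0 (B's inner loop)
def pvPrefix (dp : List Int) : List Int :=
  dp.foldl (fun acc v => acc ++ [acc.getLast?.getD 0 + v]) [0]

-- B's main loop: steps remaining, loop index i, current dp row
def pvBGo (arr : List Int) : Nat → Nat → List Int → Int
  | 0, _, dp => dp.sum
  | steps+1, i, dp =>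
    let c := (PySem.List.pyGet? arr ((i : Int) - 1)).getD 0
    if c ≠ 0 ∧ c ≠ 1 then 0
    else
      let pre := pvPrefix dp
      let dp' := if c = 0 then (List.range (i+1)).map (fun j => pre.getD j 0)
                 else (List.range (i+1)).map (fun j => pre.getD i 0 - pre.getD j 0)
      pvBGo arr steps (i+1) dp'

def sortcount1_alt (n : Int) (arr : List Int) : Int :=
  if n ≤ 0 then 0 else pvBGo arr (n-1).toNat 1 [1]

-- ===== PRECONDITION & SPEC =====
-- Pre_ excludes exactly the inputs on which A raises IndexError: n ≥ 2 with arr shorter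
-- than n-1 and all its entries in {0,1} (some permutation then walks past the end of arr).
def Pre_sortcount1 (n : Int) (arr : List Int) : Prop :=
  n ≤ 1 ∨ n - 1 ≤ (arr.length : Int) ∨ (∃ x ∈ arr, x ≠ 0 ∧ x ≠ 1)
instance (n : Int) (arr : List Int) : Decidable (Pre_sortcount1 n arr) := by
  unfold Pre_sortcount1; infer_instance

def pvWitness_sortcount1 : Int × List Int := (3, [0, 1])

def Spec_sortcount1 (n : Int) (arr : List Int) (out : Int) : Prop := out = sortcount1_alt n arr
instance (n : Int) (arr : List Int) (out : Int) : Decidable (Spec_sortcount1 n arr out) := by unfold Spec_sortcount1; infer_instance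

-- ===== CLAIM (what is proved, stated in full; the proofs are below) =====
def Claim_equal_sortcount1 : Prop := ∀ (n : Int) (arr : List Int), Dom_sortcount1 n arr → Pre_sortcount1 n arr → Spec_sortcount1 n arr (sortcount1 n arr)

-- ===== LEMMAS AND PROOFS =====

-- the list [1, 2, …, N] of Int
def pvL (N : Nat) : List Int := PySem.List.pyRange 1 ((N : Int) + 1) 1

-- the continue-condition of A's while loop at one position
def pvOK (c a b : Int) : Bool := decide ((c = 0 ∧ a < b) ∨ (c = 1 ∧ a > b))

-- p satisfies the first m constraints of arr
def pvValid (arr : List Int) (m : Nat) (p : List Int) : Bool :=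
  (List.range m).all (fun j => pvOK (arr.getD j 0) (p.getD j 0) (p.getD (j+1) 0))

-- number of permutations of [1..i] that satisfy the first i-1 constraints and end in v
def pvG (arr : List Int) (i : Nat) (v : Int) : Nat :=
  (pvL i).permutations.countP (fun p => pvValid arr (i-1) p && (p.getLast? == some v))

def pvBump (v x : Int) : Int := if v ≤ x then x + 1 else x
def pvLower (v x : Int) : Int := if v < x then x - 1 else x

def pvScan (s : Int) : List Int → List Int
  | [] => []
  | v :: t => (s + v) :: pvScan (s + v) t

-- ---- basic facts about pvL ----
lemma pvL_mem (N : Nat) (x : Int) : x ∈ pvL N ↔ 1 ≤ x ∧ x ≤ N := by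
  unfold pvL
  rw [PySem.List.mem_pyRange_one]
  omega

lemma pvL_nodup (N : Nat) : (pvL N).Nodup := by
  unfold pvL
  exact PySem.List.nodup_pyRange_one 1 _

lemma pvL_length (N : Nat) : (pvL N).length = N := by
  unfold pvL
  rw [PySem.List.length_pyRange_one]
  omega

lemma pvL_count (N : Nat) (x : Int) : (pvL N).count x = if 1 ≤ x ∧ x ≤ N then 1 else 0 := by
  by_cases h : 1 ≤ x ∧ x ≤ (N:Int)
  · rw [if_pos h]
    exact List.count_eq_one_of_mem (pvL_nodup N) ((pvL_mem N x).2 h)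
  · rw [if_neg h]
    exact List.count_eq_zero.2 (fun hm => h ((pvL_mem N x).1 hm))

-- ---- bump/lower algebra ----
lemma pvLower_pvBump (v x : Int) : pvLower v (pvBump v x) = x := by
  unfold pvLower pvBump
  split_ifs <;> omega

lemma pvBump_pvLower (v x : Int) (hx : x ≠ v) : pvBump v (pvLower v x) = x := by
  unfold pvLower pvBump
  split_ifs <;> omega

lemma pvBump_ne (v x : Int) : pvBump v x ≠ v := by
  unfold pvBump
  split_ifs <;> omega

lemma pvBump_inj (v : Int) : Function.Injective (pvBump v) := by
  intro a b h
  unfold pvBump at h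
  split_ifs at h <;> omega

lemma pvBump_lt_iff (v a b : Int) : pvBump v a < pvBump v b ↔ a < b := by
  unfold pvBump
  split_ifs <;> omega

lemma pvBump_lt_v (v a : Int) : pvBump v a < v ↔ a < v := by
  unfold pvBump
  split_ifs <;> omega

lemma pvV_lt_bump (v a : Int) : v < pvBump v a ↔ v ≤ a := by
  unfold pvBump
  split_ifs <;> omega

-- count of the bumped list
lemma pvCount_map_bump (N : Nat) (v x : Int) (h1 : 1 ≤ v) (h2 : v ≤ (N:Int)+1) :
    ((pvL N).map (pvBump v)).count x = if 1 ≤ x ∧ x ≤ (N:Int)+1 ∧ x ≠ v then 1 else 0 := by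
  by_cases hx : x = v
  · subst hx
    have h0 : ((pvL N).map (pvBump x)).count x = 0 := by
      refine List.count_eq_zero.2 (fun hm => ?_)
      obtain ⟨y, _, hy⟩ := List.mem_map.1 hm
      exact pvBump_ne x y hy
    rw [h0, if_neg (by simp)]
  · have h3 : ((pvL N).map (pvBump v)).count x = (pvL N).count (pvLower v x) := by
      conv_lhs => rw [← pvBump_pvLower v x hx]
      exact List.count_map_of_injective _ _ (pvBump_inj v) _
    rw [h3, pvL_count]
    unfold pvLower
    split_ifs <;> omega

-- the key permutation fact: bump [1..N] and append v gives a permutation of [1..N+1]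
lemma pvPerm_bump (N : Nat) (v : Int) (h1 : 1 ≤ v) (h2 : v ≤ (N:Int)+1) :
    List.Perm ((pvL N).map (pvBump v) ++ [v]) (pvL (N+1)) := by
  rw [List.perm_iff_count]
  intro a
  rw [List.count_append, pvCount_map_bump N v a h1 h2, pvL_count]
  have hs : List.count a [v] = if a = v then 1 else 0 := by
    simp only [List.count_cons, List.count_nil]
    split_ifs <;> simp_all
  rw [hs]
  push_cast
  split_ifs <;> omega

lemma pvPerm_bump_erase (N : Nat) (v : Int) (h1 : 1 ≤ v) (h2 : v ≤ (N:Int)+1) :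
    List.Perm ((pvL N).map (pvBump v)) ((pvL (N+1)).erase v) := by
  have h := pvPerm_bump N v h1 h2
  have h2' : List.Perm (v :: (pvL N).map (pvBump v)) (pvL (N+1)) :=
    (List.perm_append_singleton v _).symm.trans h
  exact (List.cons_perm_iff_perm_erase.1 h2').2

-- ---- while-loop characterisation ----
lemma pvRead (xs : List Int) (j : Nat) :
    (PySem.List.pyGet? xs (j : Int)).getD 0 = xs.getD j 0 := by
  rw [PySem.List.pyGet?_natCast, List.getD_eq_getElem?_getD]

lemma pvAWhile_char (arr p : List Int) (nm1 : Int) :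
    ∀ (F : Nat) (i : Nat), (nm1 - i).toNat ≤ F →
    (pvAWhile arr p nm1 F (i : Int) = nm1 ↔
      ((i : Int) ≤ nm1 ∧ ∀ j : Nat, i ≤ j → (j : Int) < nm1 →
        pvOK (arr.getD j 0) (p.getD j 0) (p.getD (j+1) 0) = true)) := by
  intro F
  induction F with
  | zero =>
    intro i hF
    simp only [pvAWhile]
    constructor
    · intro h
      refine ⟨le_of_eq h, fun j hj1 hj2 => ?_⟩
      exfalso
      have hij : (i : Int) ≤ (j : Int) := by exact_mod_cast hj1
      omega
    · rintro ⟨hle, _⟩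
      omega
  | succ F ih =>
    intro i hF
    by_cases hlt : (i : Int) < nm1
    · have hrec := ih (i+1) (by omega)
      simp only [pvAWhile, if_pos hlt]
      rw [pvRead arr i, pvRead p i,
        show ((i : Int) + 1) = ((i+1 : Nat) : Int) by push_cast; ring, pvRead p (i+1)]
      set c := arr.getD i 0 with hc
      set x := p.getD i 0 with hx
      set y := p.getD (i+1) 0 with hy
      by_cases hok : pvOK c x y = true
      · have hok' : (c = 0 ∧ x < y) ∨ (c = 1 ∧ x > y) := of_decide_eq_true hok
        have hstep : (if c = 0 ∧ x < y then pvAWhile arr p nm1 F ((i+1 : Nat) : Int)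
            else if c = 1 ∧ x > y then pvAWhile arr p nm1 F ((i+1 : Nat) : Int)
            else (i : Int)) = pvAWhile arr p nm1 F ((i+1 : Nat) : Int) := by
          rcases hok' with h | h
          · rw [if_pos h]
          · by_cases h0 : c = 0 ∧ x < y
            · rw [if_pos h0]
            · rw [if_neg h0, if_pos h]
        rw [hstep, hrec]
        constructor
        · rintro ⟨hle, hall⟩
          refine ⟨by omega, fun j hj1 hj2 => ?_⟩
          rcases Nat.eq_or_lt_of_le hj1 with heq | hlt'
          · subst heq
            exact hok
          · exact hall j (by omega) hj2
        · rintro ⟨hle, hall⟩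
          exact ⟨by push_cast; omega, fun j hj1 hj2 => hall j (by omega) hj2⟩
      · have hok' : ¬((c = 0 ∧ x < y) ∨ (c = 1 ∧ x > y)) := fun h => hok (decide_eq_true h)
        have hstep : (if c = 0 ∧ x < y then pvAWhile arr p nm1 F ((i+1 : Nat) : Int)
            else if c = 1 ∧ x > y then pvAWhile arr p nm1 F ((i+1 : Nat) : Int)
            else (i : Int)) = (i : Int) := by
          rw [if_neg (fun h => hok' (Or.inl h)), if_neg (fun h => hok' (Or.inr h))]
        rw [hstep]
        constructor
        · intro h
          omega
        · rintro ⟨hle, hall⟩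
          exact absurd (hall i le_rfl hlt) hok
    · simp only [pvAWhile, if_neg hlt]
      constructor
      · intro h
        refine ⟨le_of_eq h, fun j hj1 hj2 => ?_⟩
        exfalso
        have hij : (i : Int) ≤ (j : Int) := by exact_mod_cast hj1
        omega
      · rintro ⟨hle, _⟩
        omega

-- ---- counting plumbing ----
lemma pvFoldl_count (q : List Int → Bool) :
    ∀ (l : List (List Int)) (acc : Int),
      l.foldl (fun c p => if q p then c + 1 else c) acc = acc + (l.countP q : Int) := by
  intro l
  induction l with
  | nil => intro acc; simp
  | cons p t ih =>
    intro acc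
    simp only [List.foldl_cons, List.countP_cons]
    rw [ih]
    by_cases hq : q p = true
    · simp [hq]; push_cast; ring
    · simp [hq]

lemma pvSum_delta (S : List Int) (x : Int) (hS : S.Nodup) (hx : x ∈ S) :
    (S.map (fun v => if x == v then 1 else 0)).sum = 1 := by
  induction S with
  | nil => cases hx
  | cons a t ih =>
    simp only [List.map_cons, List.sum_cons]
    rcases List.mem_cons.1 hx with h | h
    · subst h
      have hz : (t.map (fun v => if x == v then 1 else 0)).sum = 0 := by
        refine List.sum_eq_zero (fun y hy => ?_)
        obtain ⟨v, hv, rfl⟩ := List.mem_map.1 hy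
        have : x ≠ v := fun hxy => (List.nodup_cons.1 hS).1 (hxy ▸ hv)
        simp [this]
      simp only [beq_iff_eq] at hz ⊢
      simp [hz]
    · have hne : ¬(x == a) = true := by
        simp only [beq_iff_eq]
        intro hxa
        exact (List.nodup_cons.1 hS).1 (hxa ▸ h)
      rw [ih (List.nodup_cons.1 hS).2 h]
      simp [hne]

-- split a count by the (unique) value of f on the counted elements
lemma pvCount_fiber (l : List (List Int)) (q : List Int → Bool) (f : List Int → Int)
    (S : List Int) (hS : S.Nodup) (hmem : ∀ p ∈ l, q p = true → f p ∈ S) :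
    (l.countP q : Nat) = (S.map (fun v => l.countP (fun p => q p && (f p == v)))).sum := by
  induction l with
  | nil => simp
  | cons p t ih =>
    simp only [List.countP_cons]
    rw [ih (fun r hr hq => hmem r (List.mem_cons_of_mem p hr) hq)]
    have hsplit : (S.map (fun v => t.countP (fun r => q r && (f r == v)) +
        if (q p && (f p == v)) = true then 1 else 0)).sum =
        (S.map (fun v => t.countP (fun r => q r && (f r == v)))).sum +
        (S.map (fun v => if (q p && (f p == v)) = true then 1 else 0)).sum := by
      rw [← List.sum_map_add]
    rw [hsplit]
    by_cases hq : q p = true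
    · have hfun : (fun v => if (q p && (f p == v)) = true then 1 else 0) =
          (fun v : Int => if (f p == v) = true then 1 else 0) := by
        funext v
        rw [hq, Bool.true_and]
      have hd : (S.map (fun v => if (q p && (f p == v)) = true then 1 else 0)).sum = 1 := by
        rw [hfun]
        exact pvSum_delta S (f p) hS (hmem p (List.mem_cons_self) hq)
      rw [hd, if_pos hq]
    · have hq' : q p = false := by simpa using hq
      have hfun : (fun v => if (q p && (f p == v)) = true then 1 else 0) =
          (fun _ : Int => (0 : Nat)) := by
        funext v
        rw [hq', Bool.false_and]
        simp
      have hd : (S.map (fun v => if (q p && (f p == v)) = true then 1 else 0)).sum = 0 := by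
        rw [hfun]
        simp
      rw [hd, if_neg hq]

lemma pvCountP_nodup_card (l : List (List Int)) (h : l.Nodup) (q : List Int → Bool) :
    l.countP q = (l.toFinset.filter (fun x => q x = true)).card := by
  rw [List.countP_eq_length_filter, ← List.toFinset_filter,
    List.toFinset_card_of_nodup (h.filter q)]

-- ---- validity transport along bump ----
lemma pvAll_congr (l : List Nat) (p q : Nat → Bool) (h : ∀ x ∈ l, p x = q x) :
    l.all p = l.all q := by
  induction l with
  | nil => rfl
  | cons a t ih =>
    simp only [List.all_cons]
    rw [h a (List.mem_cons_self), ih (fun x hx => h x (List.mem_cons_of_mem a hx))]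

lemma pvOK_bump_pair (c v a b : Int) : pvOK c (pvBump v a) (pvBump v b) = pvOK c a b := by
  unfold pvOK
  rw [decide_eq_decide]
  have h1 := pvBump_lt_iff v a b
  have h2 := pvBump_lt_iff v b a
  tauto

lemma pvGetD_bump_append (q : List Int) (v : Int) (j : Nat) (hj : j < q.length) :
    (q.map (pvBump v) ++ [v]).getD j 0 = pvBump v (q.getD j 0) := by
  rw [List.getD_append _ _ 0 j (by simpa using hj), List.getD_eq_getElem?_getD,
    List.getElem?_map, List.getD_eq_getElem?_getD, List.getElem?_eq_getElem hj]
  simp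

lemma pvGetD_bump_append_last (q : List Int) (v : Int) :
    (q.map (pvBump v) ++ [v]).getD q.length 0 = v := by
  rw [List.getD_eq_getElem?_getD]
  have : (q.map (pvBump v) ++ [v])[(q.map (pvBump v)).length]? = some v :=
    List.getElem?_concat_length
  simp only [List.length_map] at this
  rw [this]
  rfl

lemma pvValid_bump (arr q : List Int) (i : Nat) (hi : 1 ≤ i) (hq : q.length = i) (v : Int) :
    pvValid arr i (q.map (pvBump v) ++ [v]) =
      (pvValid arr (i-1) q && pvOK (arr.getD (i-1) 0) (pvBump v (q.getD (i-1) 0)) v) := by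
  unfold pvValid
  have hrange : List.range i = List.range (i-1) ++ [i-1] := by
    have : i = (i-1) + 1 := by omega
    rw [this, List.range_succ]
    congr 1 <;> omega
  rw [hrange, List.all_append]
  have hcong : (List.range (i-1)).all (fun j =>
      pvOK (arr.getD j 0) ((q.map (pvBump v) ++ [v]).getD j 0) ((q.map (pvBump v) ++ [v]).getD (j+1) 0)) =
      (List.range (i-1)).all (fun j => pvOK (arr.getD j 0) (q.getD j 0) (q.getD (j+1) 0)) := by
    refine pvAll_congr _ _ _ (fun j hj => ?_)
    have hj' : j < i - 1 := List.mem_range.1 hj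
    rw [pvGetD_bump_append q v j (by omega), pvGetD_bump_append q v (j+1) (by omega),
      pvOK_bump_pair]
  rw [hcong]
  have hlast : [i-1].all (fun j =>
      pvOK (arr.getD j 0) ((q.map (pvBump v) ++ [v]).getD j 0) ((q.map (pvBump v) ++ [v]).getD (j+1) 0)) =
      pvOK (arr.getD (i-1) 0) (pvBump v (q.getD (i-1) 0)) v := by
    have e1 : (q.map (pvBump v) ++ [v]).getD (i-1) 0 = pvBump v (q.getD (i-1) 0) :=
      pvGetD_bump_append q v (i-1) (by omega)
    have e2 : (q.map (pvBump v) ++ [v]).getD (i-1+1) 0 = v := by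
      have : i - 1 + 1 = q.length := by omega
      rw [this]
      exact pvGetD_bump_append_last q v
    simp only [List.all_cons, List.all_nil, Bool.and_true]
    rw [e1, e2]
  rw [hlast]

-- ---- the DP recursion for pvG ----
lemma pvL_one : pvL 1 = [1] := by
  unfold pvL
  have : ((1:Nat):Int) + 1 = (1:Int) + 1 := by norm_num
  rw [this, PySem.List.pyRange_one_singleton]

lemma pvG_one (arr : List Int) : pvG arr 1 1 = 1 := by
  have hL : pvL 1 = [1] := pvL_one
  unfold pvG
  rw [hL]
  have hnd : ([(1:Int)]).permutations.Nodup := List.nodup_permutations _ (by simp)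
  rw [pvCountP_nodup_card _ hnd]
  have hset : ([(1:Int)]).permutations.toFinset.filter
      (fun p => (pvValid arr (1-1) p && (p.getLast? == some 1)) = true) = {[(1:Int)]} := by
    apply Finset.ext
    intro q
    simp only [Finset.mem_filter, List.mem_toFinset, List.mem_permutations,
      List.perm_singleton, Finset.mem_singleton]
    constructor
    · rintro ⟨rfl, _⟩; rfl
    · rintro rfl
      refine ⟨rfl, ?_⟩
      simp [pvValid]
  rw [hset]
  rfl

lemma pvLastD (q : List Int) (i : Nat) (hq : q.length = i) :
    q.getLast?.getD 0 = q.getD (i-1) 0 := by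
  rw [List.getLast?_eq_getElem?, List.getD_eq_getElem?_getD, hq]

lemma pvMapLB (v : Int) (l : List Int) (hv : v ∉ l) :
    (l.map (pvLower v)).map (pvBump v) = l := by
  rw [List.map_map]
  calc l.map (pvBump v ∘ pvLower v) = l.map id :=
        List.map_congr_left (fun x hx => pvBump_pvLower v x (fun hxx => hv (hxx ▸ hx)))
    _ = l := List.map_id l

lemma pvMapBL (v : Int) (l : List Int) :
    (l.map (pvBump v)).map (pvLower v) = l := by
  rw [List.map_map]
  calc l.map (pvLower v ∘ pvBump v) = l.map id :=
        List.map_congr_left (fun x _ => pvLower_pvBump v x)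
    _ = l := List.map_id l

lemma pvNotMem_dropLast (i : Nat) (v : Int) (p' : List Int) (h1 : 1 ≤ v) (h2 : v ≤ (i:Int)+1)
    (hpperm : List.Perm (p' ++ [v]) (pvL (i+1))) : v ∉ p' := by
  have hcnt := hpperm.count_eq v
  rw [List.count_append, pvL_count] at hcnt
  have hb : (1:Int) ≤ v ∧ v ≤ ((i+1:Nat):Int) := ⟨h1, by push_cast; omega⟩
  rw [if_pos hb] at hcnt
  have hone : List.count v [v] = 1 := by simp
  rw [hone] at hcnt
  exact List.count_eq_zero.1 (by omega)

-- the forward/backward data of the insertion bijection, packaged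
lemma pvStep_core (arr : List Int) (i : Nat) (hi : 1 ≤ i) (v : Int) (h1 : 1 ≤ v)
    (h2 : v ≤ (i:Int)+1) (allow : Int → Bool) (AL : List Int) (hALnd : AL.Nodup)
    (hALmem : ∀ k : Int, k ∈ AL ↔ (1 ≤ k ∧ k ≤ (i:Int) ∧ allow k = true))
    (hOK : ∀ k : Int, pvOK (arr.getD (i-1) 0) (pvBump v k) v = allow k) :
    pvG arr (i+1) v = (AL.map (pvG arr i)).sum := by
  have hvmem : v ∈ pvL (i+1) := (pvL_mem (i+1) v).2 ⟨h1, by push_cast; omega⟩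
  have hndP : (pvL (i+1)).permutations.Nodup := List.nodup_permutations _ (pvL_nodup (i+1))
  have hndQ : (pvL i).permutations.Nodup := List.nodup_permutations _ (pvL_nodup i)
  set Qa : List Int → Bool :=
    fun q => pvValid arr (i-1) q && allow (q.getLast?.getD 0) with hQa
  -- properties of any member q of the permutations of [1..i]
  have hqfacts : ∀ q : List Int, List.Perm q (pvL i) → q.length = i ∧ q ≠ [] := by
    intro q hq
    have hlen : q.length = i := by rw [hq.length_eq, pvL_length]
    exact ⟨hlen, by intro hnil; rw [hnil] at hlen; simp at hlen; omega⟩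
  -- step A: the bijection
  have stepA : (pvL (i+1)).permutations.countP
      (fun p => pvValid arr i p && (p.getLast? == some v)) =
      (pvL i).permutations.countP Qa := by
    rw [pvCountP_nodup_card _ hndP, pvCountP_nodup_card _ hndQ]
    apply Finset.card_nbij' (i := fun p => (p.dropLast).map (pvLower v))
      (j := fun q => q.map (pvBump v) ++ [v])
    · -- forward membership
      intro p hp
      simp only [Finset.mem_coe, Finset.mem_filter, List.mem_toFinset, List.mem_permutations] at hp
      obtain ⟨hpperm, hP⟩ := hp
      rw [Bool.and_eq_true] at hP
      obtain ⟨hvalid, hlastb⟩ := hP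
      have hlast : p.getLast? = some v := by simpa using hlastb
      obtain ⟨p', rfl⟩ := List.getLast?_eq_some_iff.1 hlast
      have hdrop : (p' ++ [v]).dropLast = p' := List.dropLast_concat
      have hv' : v ∉ p' := pvNotMem_dropLast i v p' h1 h2 hpperm
      have hre : (p'.map (pvLower v)).map (pvBump v) = p' := pvMapLB v p' hv'
      have hp'erase : List.Perm p' ((pvL (i+1)).erase v) :=
        (List.cons_perm_iff_perm_erase.1
          ((List.perm_append_singleton v p').symm.trans hpperm)).2
      have hqperm : List.Perm (p'.map (pvLower v)) (pvL i) := by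
        have hx1 : List.Perm (p'.map (pvLower v)) (((pvL (i+1)).erase v).map (pvLower v)) :=
          hp'erase.map _
        have hx2 : List.Perm (((pvL i).map (pvBump v)).map (pvLower v))
            (((pvL (i+1)).erase v).map (pvLower v)) :=
          (pvPerm_bump_erase i v h1 h2).map _
        have hx3 : ((pvL i).map (pvBump v)).map (pvLower v) = pvL i := pvMapBL v _
        exact hx1.trans (hx3 ▸ hx2).symm
      obtain ⟨hqlen, hqne⟩ := hqfacts _ hqperm
      simp only [Finset.mem_coe, Finset.mem_filter, List.mem_toFinset, List.mem_permutations,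
        List.dropLast_concat]
      refine ⟨hqperm, ?_⟩
      rw [hQa, Bool.and_eq_true]
      have hvb := pvValid_bump arr (p'.map (pvLower v)) i hi hqlen v
      rw [hre] at hvb
      rw [hvalid] at hvb
      have hvb2 : (pvValid arr (i-1) (p'.map (pvLower v)) &&
          pvOK (arr.getD (i-1) 0) (pvBump v ((p'.map (pvLower v)).getD (i-1) 0)) v) = true :=
        hvb.symm
      rw [Bool.and_eq_true] at hvb2
      refine ⟨hvb2.1, ?_⟩
      rw [pvLastD _ i hqlen, ← hOK]
      exact hvb2.2
    · -- backward membership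
      intro q hq
      simp only [Finset.mem_coe, Finset.mem_filter, List.mem_toFinset, List.mem_permutations] at hq
      obtain ⟨hqperm, hQ⟩ := hq
      rw [hQa, Bool.and_eq_true] at hQ
      obtain ⟨hvalid, hallow⟩ := hQ
      obtain ⟨hqlen, hqne⟩ := hqfacts _ hqperm
      simp only [Finset.mem_coe, Finset.mem_filter, List.mem_toFinset, List.mem_permutations]
      constructor
      · have hmapperm : List.Perm (q.map (pvBump v)) ((pvL (i+1)).erase v) :=
          (hqperm.map _).trans (pvPerm_bump_erase i v h1 h2)
        have hstep1 : List.Perm (q.map (pvBump v) ++ [v]) (v :: ((pvL (i+1)).erase v)) :=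
          (List.perm_append_singleton v _).trans (hmapperm.cons v)
        exact hstep1.trans (List.perm_cons_erase hvmem).symm
      · rw [Bool.and_eq_true]
        refine ⟨?_, by rw [List.getLast?_concat]; simp⟩
        rw [pvValid_bump arr q i hi hqlen v, Bool.and_eq_true]
        refine ⟨hvalid, ?_⟩
        rw [hOK, ← pvLastD _ i hqlen]
        exact hallow
    · -- left inverse
      intro p hp
      simp only [Finset.mem_coe, Finset.mem_filter, List.mem_toFinset, List.mem_permutations] at hp
      obtain ⟨hpperm, hP⟩ := hp
      rw [Bool.and_eq_true] at hP
      have hlast : p.getLast? = some v := by simpa using hP.2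
      obtain ⟨p', rfl⟩ := List.getLast?_eq_some_iff.1 hlast
      have hv' : v ∉ p' := pvNotMem_dropLast i v p' h1 h2 hpperm
      show (List.map (pvLower v) (p' ++ [v]).dropLast).map (pvBump v) ++ [v] = p' ++ [v]
      rw [List.dropLast_concat, pvMapLB v p' hv']
    · -- right inverse
      intro q hq
      show (List.map (pvBump v) q ++ [v]).dropLast.map (pvLower v) = q
      rw [List.dropLast_concat, pvMapBL]
  -- assemble
  have stepB := pvCount_fiber ((pvL i).permutations) Qa (fun q => q.getLast?.getD 0) AL hALnd
    (by
      intro q hqmem hQ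
      rw [List.mem_permutations] at hqmem
      obtain ⟨hqlen, hqne⟩ := hqfacts _ hqmem
      rw [hQa, Bool.and_eq_true] at hQ
      have hgl : q.getLast? = some (q.getLast hqne) := List.getLast?_eq_some_getLast hqne
      have hmemq : q.getLast hqne ∈ q := List.getLast_mem hqne
      have hbounds := (pvL_mem i _).1 (hqmem.subset hmemq)
      have hv0 : q.getLast?.getD 0 = q.getLast hqne := by rw [hgl]; rfl
      refine (hALmem _).2 ⟨?_, ?_, hQ.2⟩
      · show (1:Int) ≤ q.getLast?.getD 0
        rw [hv0]; exact hbounds.1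
      · show q.getLast?.getD 0 ≤ (i:Int)
        rw [hv0]; exact hbounds.2)
  have stepC : ∀ k ∈ AL, (pvL i).permutations.countP
      (fun q => Qa q && ((q.getLast?.getD 0 : Int) == k)) = pvG arr i k := by
    intro k hk
    unfold pvG
    refine List.countP_congr (fun q hq => ?_)
    rw [List.mem_permutations] at hq
    obtain ⟨hqlen, hqne⟩ := hqfacts _ hq
    have hgl : q.getLast? = some (q.getLast hqne) := List.getLast?_eq_some_getLast hqne
    simp only [hQa]
    by_cases hak : q.getLast hqne = k
    · have hal : allow k = true := ((hALmem k).1 hk).2.2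
      simp [hgl, hak, hal]
    · simp [hgl, hak]
  have hG : pvG arr (i+1) v = (pvL (i+1)).permutations.countP
      (fun p => pvValid arr i p && (p.getLast? == some v)) := by
    unfold pvG
    simp only [Nat.add_sub_cancel]
  rw [hG, stepA, stepB]
  congr 1
  exact List.map_congr_left stepC

lemma pvG_succ (arr : List Int) (i : Nat) (hi : 1 ≤ i) (v : Int) (h1 : 1 ≤ v) (h2 : v ≤ (i:Int)+1)
    (hc : arr.getD (i-1) 0 = 0 ∨ arr.getD (i-1) 0 = 1) :
    pvG arr (i+1) v = if arr.getD (i-1) 0 = 0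
      then ((PySem.List.pyRange 1 v 1).map (pvG arr i)).sum
      else ((PySem.List.pyRange v ((i:Int)+1) 1).map (pvG arr i)).sum := by
  by_cases hc0 : arr.getD (i-1) 0 = 0
  · rw [if_pos hc0]
    refine pvStep_core arr i hi v h1 h2 (fun k => decide (k < v)) (PySem.List.pyRange 1 v 1)
      (PySem.List.nodup_pyRange_one 1 v) (fun k => ?_) (fun k => ?_)
    · rw [PySem.List.mem_pyRange_one]
      constructor
      · rintro ⟨hk1, hk2⟩
        exact ⟨hk1, by omega, decide_eq_true hk2⟩
      · rintro ⟨hk1, _, hk3⟩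
        exact ⟨hk1, of_decide_eq_true hk3⟩
    · rw [hc0]
      unfold pvOK
      rw [decide_eq_decide.2 (show ((0:Int) = 0 ∧ pvBump v k < v) ∨ ((0:Int) = 1 ∧ pvBump v k > v) ↔ k < v by
        constructor
        · rintro (⟨_, h⟩ | ⟨h01, _⟩)
          · exact (pvBump_lt_v v k).1 h
          · exact absurd h01 (by norm_num)
        · intro h
          exact Or.inl ⟨rfl, (pvBump_lt_v v k).2 h⟩)]
  · have hc1 : arr.getD (i-1) 0 = 1 := hc.resolve_left hc0
    rw [if_neg hc0]
    refine pvStep_core arr i hi v h1 h2 (fun k => decide (v ≤ k)) (PySem.List.pyRange v ((i:Int)+1) 1)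
      (PySem.List.nodup_pyRange_one v _) (fun k => ?_) (fun k => ?_)
    · rw [PySem.List.mem_pyRange_one]
      constructor
      · rintro ⟨hk1, hk2⟩
        exact ⟨by omega, by omega, decide_eq_true hk1⟩
      · rintro ⟨_, hk2, hk3⟩
        exact ⟨of_decide_eq_true hk3, by omega⟩
    · rw [hc1]
      unfold pvOK
      rw [decide_eq_decide.2 (show ((1:Int) = 0 ∧ pvBump v k < v) ∨ ((1:Int) = 1 ∧ pvBump v k > v) ↔ v ≤ k by
        constructor
        · rintro (⟨h01, _⟩ | ⟨_, h⟩)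
          · exact absurd h01 (by norm_num)
          · exact (pvV_lt_bump v k).1 h
        · intro h
          exact Or.inr ⟨rfl, (pvV_lt_bump v k).2 h⟩)]

-- ---- prefix sums of B ----
lemma pvFoldl_scan : ∀ (dp acc : List Int) (s : Int), acc.getLast? = some s →
    dp.foldl (fun a v => a ++ [a.getLast?.getD 0 + v]) acc = acc ++ pvScan s dp := by
  intro dp
  induction dp with
  | nil => intro acc s _; simp [pvScan]
  | cons v t ih =>
    intro acc s hs
    simp only [List.foldl_cons, hs, Option.getD_some]
    rw [ih (acc ++ [s + v]) (s + v) (by simp)]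
    simp [pvScan]

lemma pvPrefix_eq (dp : List Int) : pvPrefix dp = 0 :: pvScan 0 dp := by
  unfold pvPrefix
  rw [pvFoldl_scan dp [0] 0 rfl]
  simp

lemma pvScan_getD : ∀ (j : Nat) (dp : List Int) (s : Int), j < dp.length →
    (pvScan s dp).getD j 0 = s + (dp.take (j+1)).sum := by
  intro j
  induction j with
  | zero =>
    intro dp s h
    cases dp with
    | nil => simp at h
    | cons v t => simp [pvScan]
  | succ j ih =>
    intro dp s h
    cases dp with
    | nil => simp at h
    | cons v t =>
      simp only [pvScan, List.getD_cons_succ, List.take_succ_cons, List.sum_cons]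
      rw [ih t (s + v) (by simpa using h)]
      ring

lemma pvPrefix_getD (dp : List Int) (j : Nat) (hj : j ≤ dp.length) :
    (pvPrefix dp).getD j 0 = (dp.take j).sum := by
  rw [pvPrefix_eq]
  cases j with
  | zero => simp
  | succ j =>
    rw [List.getD_cons_succ, pvScan_getD j dp 0 (by omega)]
    simp

-- ---- B's loop follows pvG in the clean case ----
lemma pvSum_cast (g : Int → Nat) : ∀ (l : List Int),
    (l.map (fun v => ((g v : Nat) : Int))).sum = ((l.map g).sum : Int) := by
  intro l
  induction l with
  | nil => simp
  | cons a t ih => simp [ih]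

lemma pvL_take (i j : Nat) (hj : j ≤ i) :
    (pvL i).take j = PySem.List.pyRange 1 ((j:Int)+1) 1 := by
  unfold pvL
  rw [PySem.List.pyRange_one_append 1 ((j:Int)+1) ((i:Int)+1) (by omega) (by push_cast; omega)]
  refine List.take_left' ?_
  rw [PySem.List.length_pyRange_one]
  omega

lemma pvBGo_clean (arr : List Int) :
    ∀ (steps i : Nat), 1 ≤ i →
      (∀ j : Nat, i - 1 ≤ j → j < i - 1 + steps → (arr.getD j 0 = 0 ∨ arr.getD j 0 = 1)) →
      pvBGo arr steps i ((pvL i).map (fun v => (pvG arr i v : Int))) =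
        (((pvL (i+steps)).map (fun v => (pvG arr (i+steps) v : Int))).sum) := by
  intro steps
  induction steps with
  | zero => intro i hi hgood; simp [pvBGo]
  | succ steps ih =>
    intro i hi hgood
    set dp : List Int := (pvL i).map (fun v => (pvG arr i v : Int)) with hdp
    have hdplen : dp.length = i := by rw [hdp, List.length_map, pvL_length]
    have hread : (PySem.List.pyGet? arr ((i : Nat) - (1:Int))).getD 0 = arr.getD (i-1) 0 := by
      rw [show ((i:Nat) - (1:Int)) = ((i-1 : Nat) : Int) by push_cast [Nat.cast_sub hi]; ring]
      exact pvRead arr (i-1)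
    have hc := hgood (i-1) (le_refl _) (by omega)
    have hpre : ∀ j : Nat, j ≤ i → (pvPrefix dp).getD j 0 =
        (((PySem.List.pyRange 1 ((j:Int)+1) 1).map (pvG arr i)).sum : Int) := by
      intro j hj
      have h1 : ((pvL i).map (fun v => (pvG arr i v : Int))).take j =
          ((pvL i).take j).map (fun v => (pvG arr i v : Int)) := by
        rw [List.map_take]
      rw [pvPrefix_getD dp j (by omega), hdp, h1, pvL_take i j hj, pvSum_cast]
    simp only [pvBGo, hread]
    have hnotbad : ¬(arr.getD (i-1) 0 ≠ 0 ∧ arr.getD (i-1) 0 ≠ 1) := by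
      intro hb
      rcases hc with h | h
      · exact hb.1 h
      · exact hb.2 h
    rw [if_neg hnotbad]
    have hlenL : (pvL (i+1)).length = i + 1 := pvL_length (i+1)
    have hdp' : (if arr.getD (i-1) 0 = 0 then
          (List.range (i+1)).map (fun j => (pvPrefix dp).getD j 0)
        else (List.range (i+1)).map (fun j => (pvPrefix dp).getD i 0 - (pvPrefix dp).getD j 0)) =
        (pvL (i+1)).map (fun v => (pvG arr (i+1) v : Int)) := by
      by_cases h0 : arr.getD (i-1) 0 = 0
      · rw [if_pos h0]
        apply List.ext_getElem
        · rw [List.length_map, List.length_range, List.length_map, hlenL]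
        · intro j hj hj2
          have hjlt : j < i + 1 := by
            rw [List.length_map, List.length_range] at hj
            exact hj
          rw [List.getElem_map, List.getElem_range, List.getElem_map]
          have hL : (pvL (i+1))[j]'(by rw [hlenL]; omega) = 1 + (j:Int) := by
            simp [pvL, PySem.List.getElem_pyRange_one]
          rw [hL, hpre j (by omega),
            show (1:Int) + (j:Int) = (j:Int)+1 by ring,
            pvG_succ arr i hi ((j:Int)+1) (by omega) (by push_cast; omega) hc, if_pos h0]
      · rw [if_neg h0]
        apply List.ext_getElem
        · rw [List.length_map, List.length_range, List.length_map, hlenL]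
        · intro j hj hj2
          have hjlt : j < i + 1 := by
            rw [List.length_map, List.length_range] at hj
            exact hj
          rw [List.getElem_map, List.getElem_range, List.getElem_map]
          have hL : (pvL (i+1))[j]'(by rw [hlenL]; omega) = 1 + (j:Int) := by
            simp [pvL, PySem.List.getElem_pyRange_one]
          rw [hL, hpre j (by omega), hpre i (le_refl i),
            show (1:Int) + (j:Int) = (j:Int)+1 by ring,
            pvG_succ arr i hi ((j:Int)+1) (by omega) (by push_cast; omega) hc, if_neg h0]
          have hranges : PySem.List.pyRange 1 ((i:Int)+1) 1 =
              PySem.List.pyRange 1 ((j:Int)+1) 1 ++ PySem.List.pyRange ((j:Int)+1) ((i:Int)+1) 1 :=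
            PySem.List.pyRange_one_append 1 _ _ (by omega) (by omega)
          have hsum : ((PySem.List.pyRange 1 ((i:Int)+1) 1).map (pvG arr i)).sum =
              ((PySem.List.pyRange 1 ((j:Int)+1) 1).map (pvG arr i)).sum +
              ((PySem.List.pyRange ((j:Int)+1) ((i:Int)+1) 1).map (pvG arr i)).sum := by
            rw [hranges, List.map_append, List.sum_append]
          rw [hsum]
          push_cast
          ring
    rw [hdp', ih (i+1) (by omega) (fun j hj1 hj2 => hgood j (by omega) (by omega))]
    have hidx : i + (steps + 1) = (i + 1) + steps := by omega
    rw [hidx]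

-- ---- B's loop hits a bad constraint: returns 0 ----
lemma pvBGo_bad (arr : List Int) :
    ∀ (steps i : Nat) (dp : List Int) (m : Nat), 1 ≤ i → m < steps →
      (∀ t : Nat, t < m → (arr.getD (i-1+t) 0 = 0 ∨ arr.getD (i-1+t) 0 = 1)) →
      ¬(arr.getD (i-1+m) 0 = 0 ∨ arr.getD (i-1+m) 0 = 1) →
      pvBGo arr steps i dp = 0 := by
  intro steps
  induction steps with
  | zero => intro i dp m _ hm _ _; omega
  | succ steps ih =>
    intro i dp m hi hm hgood hbad
    have hread : (PySem.List.pyGet? arr ((i : Nat) - (1:Int))).getD 0 = arr.getD (i-1) 0 := by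
      rw [show ((i:Nat) - (1:Int)) = ((i-1 : Nat) : Int) by push_cast [Nat.cast_sub hi]; ring]
      exact pvRead arr (i-1)
    simp only [pvBGo, hread]
    cases m with
    | zero =>
      have hb : arr.getD (i-1) 0 ≠ 0 ∧ arr.getD (i-1) 0 ≠ 1 := by
        constructor
        · intro h; exact hbad (Or.inl (by simpa using h))
        · intro h; exact hbad (Or.inr (by simpa using h))
      rw [if_pos hb]
    | succ m =>
      have hc : arr.getD (i-1) 0 = 0 ∨ arr.getD (i-1) 0 = 1 := by
        have := hgood 0 (by omega)
        simpa using this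
      have hnotbad : ¬(arr.getD (i-1) 0 ≠ 0 ∧ arr.getD (i-1) 0 ≠ 1) := by
        intro hb
        rcases hc with h | h
        · exact hb.1 h
        · exact hb.2 h
      rw [if_neg hnotbad]
      exact ih (i+1) _ m (by omega)
        (by omega)
        (fun t ht => by
          have h := hgood (t+1) (by omega)
          rw [show i-1+(t+1) = i+1-1+t by omega] at h
          exact h)
        (by
          rw [show i+1-1+m = i-1+(m+1) by omega]
          exact hbad)

-- A's foldl is a countP over the permutations of [1..n]
lemma pvA_countP (n : Int) (arr : List Int) (hn1 : 1 ≤ n) :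
    sortcount1 n arr = ((pvL n.toNat).permutations.countP
      (fun p => decide (pvAWhile arr p (n-1) (n-1).toNat 0 = n-1)) : Int) := by
  simp only [sortcount1]
  have hse : PySem.List.pyRange 1 (n+1) 1 = pvL n.toNat := by
    unfold pvL
    rw [Int.toNat_of_nonneg (by omega)]
  rw [hse]
  have hfext : (fun (count : Int) p => if pvAWhile arr p (n-1) (n-1).toNat 0 = n-1
        then count + 1 else count) =
      (fun (count : Int) p =>
        if (fun p => decide (pvAWhile arr p (n-1) (n-1).toNat 0 = n-1)) p = true
        then count + 1 else count) := by
    funext c p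
    by_cases h : pvAWhile arr p (n-1) (n-1).toNat 0 = n - 1 <;> simp [h]
  rw [hfext, pvFoldl_count, zero_add]

-- A's while-test is the validity predicate
lemma pvA_valid (n : Int) (arr : List Int) (hn1 : 1 ≤ n) (p : List Int) :
    decide (pvAWhile arr p (n-1) (n-1).toNat 0 = n-1) = pvValid arr (n.toNat - 1) p := by
  have hchar := pvAWhile_char arr p (n-1) ((n-1).toNat) 0 (by simp)
  push_cast at hchar
  rw [Bool.eq_iff_iff, decide_eq_true_eq, hchar]
  unfold pvValid
  rw [List.all_eq_true]
  constructor
  · rintro ⟨_, hall⟩ x hx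
    have hx' : x < n.toNat - 1 := List.mem_range.1 hx
    exact hall x (by omega) (by omega)
  · intro hall
    refine ⟨by omega, fun j _ hj2 => hall j (List.mem_range.2 (by omega))⟩

-- the count of valid permutations split by last value
lemma pvA_sum (arr : List Int) (N : Nat) (hN : 1 ≤ N) :
    (pvL N).permutations.countP (fun p => pvValid arr (N-1) p) =
      ((pvL N).map (pvG arr N)).sum := by
  have hqfacts : ∀ q : List Int, List.Perm q (pvL N) → q.length = N ∧ q ≠ [] := by
    intro q hq
    have hlen : q.length = N := by rw [hq.length_eq, pvL_length]
    exact ⟨hlen, by intro hnil; rw [hnil] at hlen; simp at hlen; omega⟩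
  have hfib := pvCount_fiber ((pvL N).permutations) (fun p => pvValid arr (N-1) p)
    (fun q => q.getLast?.getD 0) (pvL N) (pvL_nodup N)
    (by
      intro q hqmem _
      rw [List.mem_permutations] at hqmem
      obtain ⟨hqlen, hqne⟩ := hqfacts _ hqmem
      have hgl : q.getLast? = some (q.getLast hqne) := List.getLast?_eq_some_getLast hqne
      have hmemq : q.getLast hqne ∈ q := List.getLast_mem hqne
      show q.getLast?.getD 0 ∈ pvL N
      rw [hgl]
      exact hqmem.subset hmemq)
  rw [hfib]
  congr 1
  refine List.map_congr_left (fun k hk => ?_)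
  unfold pvG
  refine List.countP_congr (fun q hq => ?_)
  rw [List.mem_permutations] at hq
  obtain ⟨hqlen, hqne⟩ := hqfacts _ hq
  have hgl : q.getLast? = some (q.getLast hqne) := List.getLast?_eq_some_getLast hqne
  by_cases hak : q.getLast hqne = k
  · simp [hgl, hak]
  · simp [hgl, hak]

-- ===== VERDICT (by name: the statement is the Claim_ definition above) =====
theorem sortcount1_spec : Claim_equal_sortcount1 := by
  unfold Claim_equal_sortcount1
  intro n arr hdom hpre
  unfold Spec_sortcount1
  by_cases hn0 : n ≤ 0
  · have hA : sortcount1 n arr = 0 := by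
      simp only [sortcount1]
      rw [PySem.List.pyRange_one_eq_nil (by omega), List.permutations_nil]
      simp only [List.foldl_cons, List.foldl_nil]
      rw [show (n-1).toNat = 0 by omega]
      simp only [pvAWhile]
      rw [if_neg (by omega)]
    rw [hA]
    unfold sortcount1_alt
    rw [if_pos hn0]
  · have hn1 : 1 ≤ n := by omega
    set N := n.toNat with hNdef
    have hN1 : 1 ≤ N := by omega
    by_cases hbadex : ∃ j : Nat, (j:Int) < n - 1 ∧ ¬(arr.getD j 0 = 0 ∨ arr.getD j 0 = 1)
    · obtain ⟨j0, hj0⟩ := hbadex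
      have hfind : ∃ j : Nat, (j:Int) < n - 1 ∧ ¬(arr.getD j 0 = 0 ∨ arr.getD j 0 = 1) := ⟨j0, hj0⟩
      have hm := Nat.find_spec hfind
      have hmin : ∀ t, t < Nat.find hfind →
          ¬((t:Int) < n - 1 ∧ ¬(arr.getD t 0 = 0 ∨ arr.getD t 0 = 1)) :=
        fun t ht => Nat.find_min hfind ht
      set m := Nat.find hfind with hmdef
      have hA : sortcount1 n arr = 0 := by
        rw [pvA_countP n arr hn1]
        have hz : (pvL N).permutations.countP
            (fun p => decide (pvAWhile arr p (n-1) (n-1).toNat 0 = n-1)) = 0 := by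
          rw [List.countP_eq_zero]
          intro p hp hdec
          have h := of_decide_eq_true hdec
          have hchar := pvAWhile_char arr p (n-1) ((n-1).toNat) 0 (by simp)
          push_cast at hchar
          have hall := (hchar.1 h).2
          have hOKm := hall m (by omega) (by omega)
          unfold pvOK at hOKm
          rcases of_decide_eq_true hOKm with ⟨hc0, _⟩ | ⟨hc1, _⟩
          · exact hm.2 (Or.inl hc0)
          · exact hm.2 (Or.inr hc1)
        rw [hz]
        rfl
      have hB : sortcount1_alt n arr = 0 := by
        unfold sortcount1_alt
        rw [if_neg hn0]
        refine pvBGo_bad arr (n-1).toNat 1 [1] m le_rfl (by omega) ?_ ?_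
        · intro t ht
          have hng := hmin t ht
          have ht' : (t:Int) < n - 1 := by omega
          rw [show 1-1+t = t by omega]
          by_contra hbad2
          exact hng ⟨ht', hbad2⟩
        · rw [show 1-1+m = m by omega]
          exact hm.2
      rw [hA, hB]
    · push_neg at hbadex
      have hgoodAll : ∀ j : Nat, (j:Int) < n - 1 → (arr.getD j 0 = 0 ∨ arr.getD j 0 = 1) :=
        fun j hj => hbadex j hj
      have hA : sortcount1 n arr = (((pvL N).map (pvG arr N)).sum : Int) := by
        rw [pvA_countP n arr hn1]
        congr 1
        calc (pvL N).permutations.countP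
              (fun p => decide (pvAWhile arr p (n-1) (n-1).toNat 0 = n-1))
            = (pvL N).permutations.countP (fun p => pvValid arr (N-1) p) :=
              List.countP_congr (fun p _ => by rw [pvA_valid n arr hn1 p, ← hNdef])
          _ = ((pvL N).map (pvG arr N)).sum := pvA_sum arr N hN1
      have hB : sortcount1_alt n arr = ((pvL N).map (fun v => (pvG arr N v : Int))).sum := by
        unfold sortcount1_alt
        rw [if_neg hn0]
        rw [show (n-1).toNat = N - 1 by omega]
        have hinit : ([(1:Int)] : List Int) = (pvL 1).map (fun v => (pvG arr 1 v : Int)) := by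
          rw [pvL_one]
          simp [pvG_one]
        rw [hinit, pvBGo_clean arr (N-1) 1 le_rfl (fun j hj1 hj2 => hgoodAll j (by omega))]
        rw [show 1 + (N-1) = N by omega]
      rw [hA, hB, pvSum_cast]
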